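-- pv_equiv track=rewrite | github.com/kathoum/classroom_material_downloader | download.py | make_unique_names
-- ===== SOURCE A (Python) =====
-- from collections import Counter
-- from typing import List
--
-- def title_to_filename(title):
--     s = ''.join(
--         ' ' if not c.isprintable()
--         else '_' if c in '\\/<>|?*'
--         else '-' if c == ':'
--         else "'" if c == '"'
--         else c
--         for c in title)
--     s = s.strip().strip('.')[:200]
--     return s or "no_name"
--
-- def make_unique_names(names: List[str], has_extension):
--     names = [title_to_filename(n) for n in names]
--     counter = Counter(names)
--     suffix = {name:1 for name in counter if counter[name] > 1}
--     if not suffix: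
--         return names
--     else:
--         new_names = []
--         for name in names:
--             if name in suffix:
--                 if has_extension:
--                     # 'photo.jpg' --> 'photo_001.jpg'
--                     s = name.split('.')
--                     s1 = s[:-2]
--                     s2 = s[-2:]
--                     s2[0] += f"_{suffix[name]:03}"
--                     n = '.'.join(s1 + s2)
--                 else:
--                     # 'party' --> 'party_001'
--                     n = f"{name}_{suffix[name]:03}"
--                 new_names.append(n)
--                 suffix[name] += 1
--             else:
--                 new_names.append(name)
--         return new_names
-- ===== SOURCE B (Python) =====
-- def title_to_filename(title):
--     s = ''.join(
--         ' ' if not c.isprintable()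
--         else '_' if c in '\\/<>|?*'
--         else '-' if c == ':'
--         else "'" if c == '"'
--         else c
--         for c in title)
--     s = s.strip().strip('.')[:200]
--     return s or "no_name"
--
-- def _with_suffix(name, k, has_extension):
--     tag = f"_{k:03}"
--     if not has_extension:
--         return name + tag
--     parts = name.split('.')
--     j = len(parts) - 2 if len(parts) >= 2 else 0
--     parts[j] += tag
--     return '.'.join(parts)
--
-- def make_unique_names(names, has_extension):
--     sanitized = [title_to_filename(n) for n in names]
--     groups = {}
--     for i, name in enumerate(sanitized):
--         groups.setdefault(name, []).append(i)
--     result = list(sanitized)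
--     for name, idxs in groups.items():
--         if len(idxs) > 1:
--             for k, i in enumerate(idxs, 1):
--                 result[i] = _with_suffix(name, k, has_extension)
--     return result
-- ===== Notes on version B (the rewrite author's own statement) =====
-- stated objective: alternative
-- what changed: Replaced A's single pass with a mutable per-name suffix-counter dict by a group-by-then-scatter strategy: one pass builds a dict from each sanitized name to its list of indices, then each duplicate group is enumerated from 1 and its suffixed names are scattered into a copy of the sanitized list by index.
import Mathlib
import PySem

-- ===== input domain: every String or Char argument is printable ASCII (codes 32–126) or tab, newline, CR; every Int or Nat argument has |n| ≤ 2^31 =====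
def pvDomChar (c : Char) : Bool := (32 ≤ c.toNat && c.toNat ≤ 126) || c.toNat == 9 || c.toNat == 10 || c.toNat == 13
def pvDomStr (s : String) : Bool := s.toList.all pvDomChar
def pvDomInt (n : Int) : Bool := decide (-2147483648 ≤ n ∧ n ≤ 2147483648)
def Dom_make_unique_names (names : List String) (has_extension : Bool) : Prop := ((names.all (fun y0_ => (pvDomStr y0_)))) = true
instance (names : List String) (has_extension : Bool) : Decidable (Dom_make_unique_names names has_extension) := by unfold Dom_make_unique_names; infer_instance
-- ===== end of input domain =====

-- B replaces A's single stateful pass (per-name suffix-counter dict mutated while appending) by a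
-- group-by-then-scatter strategy: group indices by sanitized name, then scatter suffixed names into
-- a copy of the sanitized list (alternative decomposition, same cost).

-- ===== PORT A =====

-- shared helper: Python's f"{k:03}" (equal to str(k).zfill(3)); both sources format suffixes this way
def fmt03 (k : Int) : String := PySem.Str.zfill (PySem.Int.toStr k) 3

-- c.isprintable(): exact on the ASCII domain (printable = codes 32..126; tab/newline/CR are not printable)
def pyPrintable (c : Char) : Bool := 32 ≤ c.toNat && c.toNat ≤ 126

-- per-character replacement done by the generator expression in title_to_filename
def sanitizeChar (c : Char) : Char :=
  if !pyPrintable c then ' '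
  else if ("\\/<>|?*".toList).contains c then '_'   -- c in '\\/<>|?*' : single char, so membership
  else if c = ':' then '-'
  else if c = '"' then '\''
  else c

def title_to_filename (title : String) : String :=
  let s := String.ofList (title.toList.map sanitizeChar)
  let s := PySem.Str.slice (PySem.Str.stripChars (PySem.Str.strip s) ".") none (some 200)
  if s = "" then "no_name" else s   -- `s or "no_name"`

-- A's has_extension block computing n from name and v = suffix[name]
def suffixedNameA (name : String) (v : Int) (has_extension : Bool) : String :=
  if has_extension then
    let s := (PySem.Str.split? name ".").getD []   -- s = name.split('.'); '.' ≠ '' so split? is some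
    let s1 := PySem.List.slice s none (some (-2))
    let s2 := PySem.List.slice s (some (-2)) none
    let s2 := match s2 with
      | [] => ([] : List String)                   -- unreachable: Python split never returns []
      | h :: t => (h ++ "_" ++ fmt03 v) :: t       -- s2[0] += f"_{v:03}"
    PySem.Str.join "." (s1 ++ s2)
  else name ++ "_" ++ fmt03 v

-- A's loop body over state (new_names, suffix)
def stepA (has_extension : Bool) (st : List String × PySem.Dict String Int) (name : String) :
    List String × PySem.Dict String Int :=
  if st.2.contains name then
    (st.1 ++ [suffixedNameA name (st.2.getD name 0) has_extension],
     st.2.insert name (st.2.getD name 0 + 1))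
  else (st.1 ++ [name], st.2)

def make_unique_names (names : List String) (has_extension : Bool) : List String :=
  let names := names.map title_to_filename
  let counter := PySem.Dict.counter names
  let suffix := counter.keys.foldl
    (fun d name => if 1 < counter.getD name 0 then d.insert name 1 else d) PySem.Dict.empty
  if suffix.items = [] then names                     -- `if not suffix: return names`
  else (names.foldl (stepA has_extension) ([], suffix)).1

-- ===== PORT B =====

-- Source B's _with_suffix
def with_suffix (name : String) (k : Int) (has_extension : Bool) : String :=
  let tag := "_" ++ fmt03 k
  if !has_extension then name ++ tag
  else
    let parts := (PySem.Str.split? name ".").getD []   -- name.split('.'); '.' ≠ '' so split? is some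
    let j : Nat := if 2 ≤ parts.length then parts.length - 2 else 0
    let parts := parts.set j (parts.getD j "" ++ tag)  -- parts[j] += tag
    PySem.Str.join "." parts

def make_unique_names_alt (names : List String) (has_extension : Bool) : List String :=
  let sanitized := names.map title_to_filename
  -- for i, name in enumerate(sanitized): groups.setdefault(name, []).append(i)
  -- (setdefault-then-append is groups[name] = groups.get(name, []) + [i], i.e. Dict.modify)
  let groups := (PySem.List.enumerate sanitized 0).foldl
      (fun d p => d.modify p.2 [] (fun xs => xs ++ [p.1]))
      (PySem.Dict.empty : PySem.Dict String (List Int))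
  let result := sanitized                             -- result = list(sanitized)
  -- for name, idxs in groups.items(): if len(idxs) > 1: for k, i in enumerate(idxs, 1): result[i] = ...
  groups.items.foldl (fun res q =>
    if 1 < q.2.length then
      (PySem.List.enumerate q.2 1).foldl
        (fun res r => res.set r.2.toNat (with_suffix q.1 r.1 has_extension)) res
        -- r.2 is an index produced by enumerate, hence nonnegative: .toNat is exact here
    else res) result

-- ===== PRECONDITION & SPEC =====
def Spec_make_unique_names (names : List String) (has_extension : Bool) (out : List String) : Prop := out = make_unique_names_alt names has_extension
instance (names : List String) (has_extension : Bool) (out : List String) : Decidable (Spec_make_unique_names names has_extension out) := by unfold Spec_make_unique_names; infer_instance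

-- ===== CLAIM (what is proved, stated in full; the proofs are below) =====
def Claim_equal_make_unique_names : Prop := ∀ (names : List String) (has_extension : Bool), Dom_make_unique_names names has_extension → Spec_make_unique_names names has_extension (make_unique_names names has_extension)

-- ===== LEMMAS AND PROOFS =====

-- the common pointwise specification both ports are proved equal to:
-- position j holds the sanitized name if it is unique, else that name suffixed by 1 + its count so far
def specMap (L : List String) (hx : Bool) : List String :=
  (PySem.List.enumerate L 0).map (fun p =>
    if (PySem.Dict.counter L).getD p.2 0 == 1 then p.2
    else with_suffix p.2 (((PySem.List.slice L none (some p.1)).count p.2 : Int) + 1) hx)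

-- ===== A-side lemmas (A = specMap) =====

-- slices with stop/start -2 on a list of length ≥ 2
theorem slice_neg2_to {α : Type} (s : List α) (h : 2 ≤ s.length) :
    PySem.List.slice s none (some (-2)) = s.take (s.length - 2) := by
  have h2 : ¬ ((s.length:Int) + (-2) < 0) := by omega
  simp only [PySem.List.slice, PySem.List.clampIdx]
  norm_num [h2]
  try congr 1
  all_goals omega

theorem slice_neg2_from {α : Type} (s : List α) (h : 2 ≤ s.length) :
    PySem.List.slice s (some (-2)) none = s.drop (s.length - 2) := by
  have h2 : ¬ ((s.length:Int) + (-2) < 0) := by omega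
  simp only [PySem.List.slice, PySem.List.clampIdx]
  norm_num [h2]
  rw [List.take_of_length_le (by rw [List.length_drop]; try omega)]
  try congr 1
  all_goals omega

-- the two ways of grafting the tag into the split pieces coincide (any pieces list)
theorem graft_eq (s : List String) (tag : String) :
    PySem.List.slice s none (some (-2)) ++
      (match PySem.List.slice s (some (-2)) none with
        | [] => ([] : List String)
        | h :: t => (h ++ tag) :: t)
    = s.set (if 2 ≤ s.length then s.length - 2 else 0)
        (s.getD (if 2 ≤ s.length then s.length - 2 else 0) "" ++ tag) := by
  match s with
  | [] => rfl
  | [x] => rfl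
  | a :: b :: t =>
    have hlen : 2 ≤ (a :: b :: t).length := by simp
    have hj : (a :: b :: t).length - 2 < (a :: b :: t).length := by simp
    rw [slice_neg2_to _ hlen, slice_neg2_from _ hlen, if_pos hlen,
        List.drop_eq_getElem_cons hj, List.set_eq_take_append_cons_drop, if_pos hj,
        List.getD_eq_getElem _ _ hj]

-- A's inline suffixing equals B's _with_suffix
theorem suffixed_eq (name : String) (v : Int) (hx : Bool) :
    suffixedNameA name v hx = with_suffix name v hx := by
  cases hx with
  | false => simp [suffixedNameA, with_suffix, String.append_assoc]
  | true =>
    simp only [suffixedNameA, with_suffix, Bool.not_true, if_true, Bool.false_eq_true, if_false]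
    apply congrArg (PySem.Str.join ".")
    have := graft_eq ((PySem.Str.split? name ".").getD []) ("_" ++ fmt03 v)
    simp only [String.append_assoc] at this ⊢
    exact this

-- the suffix-dict construction: membership and initial value
theorem mkSuffix_contains (cnt : PySem.Dict String Int) :
    ∀ (ks : List String) (d : PySem.Dict String Int) (n : String),
      (ks.foldl (fun d name => if 1 < cnt.getD name 0 then d.insert name 1 else d) d).contains n
        = (d.contains n || (ks.contains n && decide (1 < cnt.getD n 0))) := by
  intro ks
  induction ks with
  | nil => intro d n; simp
  | cons k t ih =>
    intro d n
    rw [List.foldl_cons, ih]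
    by_cases hn : n = k
    · subst hn
      by_cases hk : 1 < cnt.getD n 0
      · rw [if_pos hk, PySem.Dict.contains_insert]
        simp [hk]
      · rw [if_neg hk]
        simp [hk]
    · have hnk : (n == k) = false := beq_eq_false_iff_ne.mpr hn
      by_cases hk : 1 < cnt.getD k 0
      · rw [if_pos hk, PySem.Dict.contains_insert, List.contains_cons, hnk]
        simp
      · rw [if_neg hk, List.contains_cons, hnk]
        simp

theorem mkSuffix_getD (cnt : PySem.Dict String Int) :
    ∀ (ks : List String) (d : PySem.Dict String Int) (n : String),
      (ks.foldl (fun d name => if 1 < cnt.getD name 0 then d.insert name 1 else d) d).getD n 0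
        = if ks.contains n ∧ 1 < cnt.getD n 0 then 1 else d.getD n 0 := by
  intro ks
  induction ks with
  | nil => intro d n; simp
  | cons k t ih =>
    intro d n
    rw [List.foldl_cons, ih]
    by_cases hn : n = k
    · subst hn
      by_cases hk : 1 < cnt.getD n 0
      · rw [if_pos hk]
        by_cases hin : t.contains n = true
        · rw [if_pos ⟨hin, hk⟩, if_pos ⟨by simp, hk⟩]
        · rw [if_neg (fun hh => hin hh.1), if_pos ⟨by simp, hk⟩,
              PySem.Dict.getD_insert_self]
      · rw [if_neg hk, if_neg (fun h => hk h.2), if_neg (fun h => hk h.2)]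
    · have hnk : (n == k) = false := beq_eq_false_iff_ne.mpr hn
      have hcc : ((k :: t).contains n) = t.contains n := by
        rw [List.contains_cons, hnk, Bool.false_or]
      by_cases hk : 1 < cnt.getD k 0
      · rw [if_pos hk, PySem.Dict.getD_insert_of_ne _ _ _ hn, hcc]
      · rw [if_neg hk, hcc]

theorem contains_of_items_nil {κ ν : Type} [BEq κ] (d : PySem.Dict κ ν) (h : d.items = [])
    (k : κ) : d.contains k = false := by
  simp [PySem.Dict.contains, h]

-- specMap is the identity when every occurring name is unique
theorem enumMap_id (L : List String) (hx : Bool) (huniq : ∀ n, n ∈ L → L.count n = 1) :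
    ∀ (rest : List String) (k : Int), (∀ n, n ∈ rest → n ∈ L) →
      (PySem.List.enumerate rest k).map (fun p =>
        if (PySem.Dict.counter L).getD p.2 0 == 1 then p.2
        else with_suffix p.2 (((PySem.List.slice L none (some p.1)).count p.2 : Int) + 1) hx)
      = rest := by
  intro rest
  induction rest with
  | nil => intro k _; rfl
  | cons x t ih =>
    intro k hmem
    have hx1 : x ∈ L := hmem x (by simp)
    have hcx : L.count x = 1 := huniq x hx1
    show (if (PySem.Dict.counter L).getD x 0 == 1 then x else _) :: _ = x :: t
    rw [PySem.Dict.getD_counter, hcx]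
    simp only [Nat.cast_one, BEq.rfl, if_true]
    rw [ih (k + 1) (fun n hn => hmem n (by simp [hn]))]

-- A's loop invariant: A's fold over the tail equals specMap's map over the tail
theorem loopA_eq (L : List String) (hx : Bool) :
    ∀ (rest p acc : List String) (sfx : PySem.Dict String Int),
      L = p ++ rest →
      (∀ n, sfx.contains n = decide (1 < L.count n)) →
      (∀ n, 1 < L.count n → sfx.getD n 0 = 1 + (p.count n : Int)) →
      (rest.foldl (stepA hx) (acc, sfx)).1
        = acc ++ (PySem.List.enumerate rest (p.length : Int)).map (fun q =>
            if (PySem.Dict.counter L).getD q.2 0 == 1 then q.2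
            else with_suffix q.2 (((PySem.List.slice L none (some q.1)).count q.2 : Int) + 1) hx) := by
  intro rest
  induction rest with
  | nil => intro p acc sfx _ _ _; simp [PySem.List.enumerate]
  | cons name rest' ih =>
    intro p acc sfx hL hc hg
    have hmem : name ∈ L := by rw [hL]; simp
    have hcount1 : 0 < L.count name := List.count_pos_iff.mpr hmem
    have henum : PySem.List.enumerate (name :: rest') (p.length : Int)
        = ((p.length : Int), name) :: PySem.List.enumerate rest' ((p.length : Int) + 1) := rfl
    have hslice : PySem.List.slice L none (some (p.length : Int)) = p := by
      rw [PySem.List.slice_to L (by positivity), Int.toNat_natCast, hL, List.take_left]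
    rw [List.foldl_cons, henum, List.map_cons]
    by_cases hdup : 1 < L.count name
    · have hct : sfx.contains name = true := by rw [hc]; simp [hdup]
      have hv : sfx.getD name 0 = 1 + (p.count name : Int) := hg name hdup
      have hstep : stepA hx (acc, sfx) name
          = (acc ++ [suffixedNameA name (sfx.getD name 0) hx],
             sfx.insert name (sfx.getD name 0 + 1)) := by
        simp [stepA, hct]
      rw [hstep]
      have hc' : ∀ n, (sfx.insert name (sfx.getD name 0 + 1)).contains n
          = decide (1 < L.count n) := by
        intro n
        rw [PySem.Dict.contains_insert]
        by_cases hn : n = name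
        · subst hn; simp [hdup]
        · simp [hn, hc, beq_iff_eq]
      have hg' : ∀ n, 1 < L.count n →
          (sfx.insert name (sfx.getD name 0 + 1)).getD n 0 = 1 + ((p ++ [name]).count n : Int) := by
        intro n hn
        by_cases hnn : n = name
        · subst hnn
          rw [PySem.Dict.getD_insert_self, hv]
          simp [List.count_append]
          ring
        · have h0 : (name == n) = false := beq_eq_false_iff_ne.mpr (Ne.symm hnn)
          rw [PySem.Dict.getD_insert_of_ne _ _ _ hnn, hg n hn]
          simp [List.count_append, List.count_singleton, h0]
      have hrec := ih (p ++ [name]) (acc ++ [suffixedNameA name (sfx.getD name 0) hx])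
        (sfx.insert name (sfx.getD name 0 + 1)) (by rw [hL]; simp) hc' hg'
      have hcond : ((PySem.Dict.counter L).getD name 0 == 1) = false := by
        rw [PySem.Dict.getD_counter]
        apply beq_eq_false_iff_ne.mpr
        have h2 : (1:Int) < (L.count name : Int) := by exact_mod_cast hdup
        omega
      have hval : suffixedNameA name (sfx.getD name 0) hx
          = with_suffix name (((PySem.List.slice L none (some (p.length : Int))).count name : Int) + 1) hx := by
        rw [suffixed_eq, hslice, hv, add_comm]
      have hlen : ((p ++ [name]).length : Int) = (p.length : Int) + 1 := by simp
      rw [hlen] at hrec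
      rw [hrec, hval]
      simp [List.append_assoc]
      intro h2
      exact absurd h2 (by omega)
    · have hct : sfx.contains name = false := by rw [hc]; simp [hdup]
      have hstep : stepA hx (acc, sfx) name = (acc ++ [name], sfx) := by
        simp [stepA, hct]
      rw [hstep]
      have hg' : ∀ n, 1 < L.count n → sfx.getD n 0 = 1 + ((p ++ [name]).count n : Int) := by
        intro n hn
        have hnn : n ≠ name := by intro e; subst e; exact hdup hn
        have h0 : (name == n) = false := beq_eq_false_iff_ne.mpr (Ne.symm hnn)
        rw [hg n hn]
        simp [List.count_append, List.count_singleton, h0]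
      have hrec := ih (p ++ [name]) (acc ++ [name]) sfx (by rw [hL]; simp) hc hg'
      have hcond : ((PySem.Dict.counter L).getD name 0 == 1) = true := by
        rw [PySem.Dict.getD_counter]
        apply beq_iff_eq.mpr
        have h2 : L.count name = 1 := by omega
        exact_mod_cast h2
      have hlen : ((p ++ [name]).length : Int) = (p.length : Int) + 1 := by simp
      rw [hlen] at hrec
      rw [hrec]
      simp [List.append_assoc]
      intro h2
      exact absurd (by omega : List.count name L = 1) h2

-- A equals the pointwise spec
theorem A_eq_specMap (names : List String) (hx : Bool) :
    make_unique_names names hx = specMap (names.map title_to_filename) hx := by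
  simp only [make_unique_names, specMap]
  set L := names.map title_to_filename with hLdef
  split_ifs with hemp
  · have huniq : ∀ n, n ∈ L → L.count n = 1 := by
      intro n hn
      by_contra hne
      have hdup : 1 < L.count n := by
        have := List.count_pos_iff.mpr hn
        omega
      have h1 := mkSuffix_contains (PySem.Dict.counter L) (PySem.Dict.counter L).keys
        PySem.Dict.empty n
      rw [contains_of_items_nil _ hemp n, PySem.Dict.contains_empty] at h1
      have hks : (PySem.Dict.counter L).keys.contains n = true := by
        rw [PySem.Dict.keys_counter, List.contains_eq_mem]
        simp [PySem.Set.mem_ofList, hn]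
      rw [hks] at h1
      have hd : decide (1 < (PySem.Dict.counter L).getD n 0) = true := by
        rw [PySem.Dict.getD_counter]
        simp only [decide_eq_true_eq]
        exact_mod_cast hdup
      rw [hd] at h1
      simp at h1
    exact (enumMap_id L hx huniq L 0 (fun n hn => hn)).symm
  · have hc : ∀ n, ((PySem.Dict.counter L).keys.foldl
        (fun d name => if 1 < (PySem.Dict.counter L).getD name 0 then d.insert name 1 else d)
        (PySem.Dict.empty : PySem.Dict String Int)).contains n = decide (1 < L.count n) := by
      intro n
      rw [mkSuffix_contains, PySem.Dict.contains_empty, Bool.false_or]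
      by_cases hdup : 1 < L.count n
      · have hn : n ∈ L := List.count_pos_iff.mp (by omega)
        have hks : (PySem.Dict.counter L).keys.contains n = true := by
          rw [PySem.Dict.keys_counter, List.contains_eq_mem]
          simp [PySem.Set.mem_ofList, hn]
        have hd : decide (1 < (PySem.Dict.counter L).getD n 0) = true := by
          rw [PySem.Dict.getD_counter]
          simp only [decide_eq_true_eq]
          exact_mod_cast hdup
        rw [hks, hd]
        simp [hdup]
      · have hd : decide (1 < (PySem.Dict.counter L).getD n 0) = false := by
          rw [PySem.Dict.getD_counter]
          simp only [decide_eq_false_iff_not]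
          intro h
          exact hdup (by exact_mod_cast h)
        rw [hd]
        simp [hdup]
    have hg : ∀ n, 1 < L.count n → ((PySem.Dict.counter L).keys.foldl
        (fun d name => if 1 < (PySem.Dict.counter L).getD name 0 then d.insert name 1 else d)
        (PySem.Dict.empty : PySem.Dict String Int)).getD n 0 = 1 + ((List.count n ([] : List String) : Int)) := by
      intro n hn
      rw [mkSuffix_getD]
      have hmem : n ∈ L := List.count_pos_iff.mp (by omega)
      have hks : (PySem.Dict.counter L).keys.contains n = true := by
        rw [PySem.Dict.keys_counter, List.contains_eq_mem]
        simp [PySem.Set.mem_ofList, hmem]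
      have hd : 1 < (PySem.Dict.counter L).getD n 0 := by
        rw [PySem.Dict.getD_counter]
        exact_mod_cast hn
      rw [if_pos ⟨hks, hd⟩]
      simp
    have hmain := loopA_eq L hx L [] []
      ((PySem.Dict.counter L).keys.foldl
        (fun d name => if 1 < (PySem.Dict.counter L).getD name 0 then d.insert name 1 else d)
        (PySem.Dict.empty : PySem.Dict String Int))
      (by simp) hc hg
    simpa using hmain

-- ===== B-side lemmas (B = specMap) =====

-- the index list of nm in L, as the group-by fold produces it (offset k)
def idxsAux (nm : String) (L : List String) (k : Int) : List Int :=
  ((PySem.List.enumerate L k).filter (fun p => p.2 == nm)).map (·.1)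

theorem idxsAux_cons (nm a : String) (t : List String) (k : Int) :
    idxsAux nm (a :: t) k = (if a == nm then [k] else []) ++ idxsAux nm t (k + 1) := by
  unfold idxsAux
  rw [PySem.List.enumerate_cons]
  by_cases h : (a == nm) = true
  · simp [h]
  · simp [h]

theorem idxsAux_lb (nm : String) :
    ∀ (L : List String) (k : Int), ∀ x ∈ idxsAux nm L k, k ≤ x := by
  intro L
  induction L with
  | nil => intro k x hx; simp [idxsAux, PySem.List.enumerate_nil] at hx
  | cons a t ih =>
    intro k x hx
    rw [idxsAux_cons] at hx
    rcases List.mem_append.mp hx with h | h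
    · split_ifs at h <;> simp at h; omega
    · have := ih (k + 1) x h; omega

theorem idxsAux_length (nm : String) :
    ∀ (L : List String) (k : Int), (idxsAux nm L k).length = L.count nm := by
  intro L
  induction L with
  | nil => intro k; simp [idxsAux, PySem.List.enumerate_nil]
  | cons a t ih =>
    intro k
    rw [idxsAux_cons]
    by_cases h : (a == nm) = true
    · obtain rfl := eq_of_beq h
      simp [ih]
    · have hne : ¬ (a = nm) := fun e => h (beq_iff_eq.mpr e)
      have : (nm == a) = false := beq_eq_false_iff_ne.mpr (Ne.symm hne)
      simp [h, List.count_cons, ih (k + 1)]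

theorem idxsAux_nodup (nm : String) :
    ∀ (L : List String) (k : Int), (idxsAux nm L k).Nodup := by
  intro L
  induction L with
  | nil => intro k; simp [idxsAux, PySem.List.enumerate_nil]
  | cons a t ih =>
    intro k
    rw [idxsAux_cons]
    by_cases h : (a == nm) = true
    · simp only [h, if_true, List.singleton_append, List.nodup_cons]
      refine ⟨fun hk => ?_, ih (k + 1)⟩
      have := idxsAux_lb nm t (k + 1) k hk
      omega
    · simp [h, ih (k + 1)]

theorem idxsAux_spec (nm : String) :
    ∀ (L : List String) (k : Int) (j : Nat) (h : j < L.length),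
      (L[j] = nm → ((k + (j : Int)) ∈ idxsAux nm L k ∧
        (idxsAux nm L k).idxOf (k + (j : Int)) = (L.take j).count nm)) ∧
      (L[j] ≠ nm → (k + (j : Int)) ∉ idxsAux nm L k) := by
  intro L
  induction L with
  | nil => intro k j h; simp at h
  | cons a t ih =>
    intro k j h
    match j with
    | 0 =>
      rw [idxsAux_cons]
      simp only [List.getElem_cons_zero, Nat.cast_zero, add_zero, List.take_zero]
      constructor
      · intro ha
        have hb : (a == nm) = true := beq_iff_eq.mpr ha
        rw [hb]
        simp [List.idxOf_cons_self]
      · intro ha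
        have hb : (a == nm) = false := beq_eq_false_iff_ne.mpr ha
        rw [hb]
        intro hk
        have := idxsAux_lb nm t (k + 1) k (by simpa using hk)
        omega
    | m + 1 =>
      have hm : m < t.length := by simpa using h
      have ihm := ih (k + 1) m hm
      rw [idxsAux_cons]
      have hcast : k + ((m + 1 : Nat) : Int) = (k + 1) + (m : Int) := by push_cast; ring
      rw [hcast]
      simp only [List.getElem_cons_succ, List.take_succ_cons]
      have hge : (k + 1 : Int) ≤ (k + 1) + (m : Int) := by omega
      by_cases hb : (a == nm) = true
      · obtain rfl := eq_of_beq hb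
        simp only [beq_self_eq_true, if_true, List.singleton_append]
        constructor
        · intro htm
          obtain ⟨hmem, hidx⟩ := ihm.1 htm
          refine ⟨List.mem_cons_of_mem _ hmem, ?_⟩
          have hne : k ≠ (k + 1) + (m : Int) := by omega
          rw [List.idxOf_cons_ne _ hne, hidx, List.count_cons_self]
        · intro htm hk
          rcases List.mem_cons.mp hk with he | hmem
          · omega
          · exact (ihm.2 htm) hmem
      · have hbf : (a == nm) = false := by simpa using hb
        rw [hbf]
        have hanm : a ≠ nm := fun e => hb (beq_iff_eq.mpr e)
        have hcnt : (a :: t.take m).count nm = (t.take m).count nm := by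
          rw [List.count_cons]
          simp [hanm]
        simp only [Bool.false_eq_true, if_false, List.nil_append]
        rw [hcnt]
        exact ihm

-- the inner scatter loop, pointwise
theorem scatter_get (hx : Bool) (nm : String) :
    ∀ (xs : List Int), xs.Nodup → (∀ x ∈ xs, 0 ≤ x) →
    ∀ (k : Int) (res : List String) (j : Nat) (hj : j < res.length),
      ((PySem.List.enumerate xs k).foldl
        (fun r p => r.set p.2.toNat (with_suffix nm p.1 hx)) res)[j]?
      = some (if (j : Int) ∈ xs then with_suffix nm (k + (xs.idxOf (j : Int) : Int)) hx
              else res[j]) := by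
  intro xs
  induction xs with
  | nil =>
    intro _ _ k res j hj
    simp [PySem.List.enumerate_nil, List.getElem?_eq_getElem hj]
  | cons x t ih =>
    intro hnd hnn k res j hj
    obtain ⟨hxt, hndt⟩ := List.nodup_cons.mp hnd
    have hx0 : (0 : Int) ≤ x := hnn x (by simp)
    rw [PySem.List.enumerate_cons, List.foldl_cons]
    set res1 := res.set x.toNat (with_suffix nm k hx) with hres1
    have hlen1 : res1.length = res.length := by simp [hres1]
    have hj' : j < res1.length := by omega
    have ihr := ih hndt (fun y hy => hnn y (List.mem_cons_of_mem _ hy)) (k + 1) res1 j hj'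
    rw [ihr]
    by_cases hjx : (j : Int) = x
    · have hjx' : j = x.toNat := by omega
      have hnt : (j : Int) ∉ t := by rw [hjx]; exact hxt
      have hv : res1[j] = with_suffix nm k hx := by
        subst hjx'
        simp [hres1, List.getElem_set_self]
      rw [if_neg hnt, hv]
      have hmem : (j : Int) ∈ x :: t := by rw [hjx]; exact List.mem_cons_self
      rw [if_pos hmem, hjx, List.idxOf_cons_self]
      norm_num
    · have hjx' : j ≠ x.toNat := by omega
      have hv : res1[j] = res[j] := by
        have h1 : res1[j]? = res[j]? := by
          rw [hres1]
          exact List.getElem?_set_ne (fun e : x.toNat = j => hjx' e.symm)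
        rw [List.getElem?_eq_getElem hj', List.getElem?_eq_getElem hj] at h1
        exact Option.some.inj h1
      have hmm : ((j : Int) ∈ x :: t) ↔ ((j : Int) ∈ t) := by
        simp [List.mem_cons, hjx]
      by_cases hmt : (j : Int) ∈ t
      · rw [if_pos hmt, if_pos (hmm.mpr hmt), List.idxOf_cons_ne _ (fun e => hjx e.symm)]
        push_cast
        ring_nf
      · rw [if_neg hmt, if_neg (fun hc => hmt (hmm.mp hc)), hv]

theorem scatter_length (hx : Bool) (nm : String) (xs : List Int) :
    ∀ (k : Int) (res : List String),
      ((PySem.List.enumerate xs k).foldl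
        (fun r p => r.set p.2.toNat (with_suffix nm p.1 hx)) res).length = res.length := by
  induction xs with
  | nil => intro k res; rfl
  | cons x t ih =>
    intro k res
    rw [PySem.List.enumerate_cons, List.foldl_cons, ih]
    simp

-- the value specMap places at position j
def specVal (L : List String) (hx : Bool) (j : Nat) : String :=
  if L.count (L.getD j "") = 1 then L.getD j ""
  else with_suffix (L.getD j "") (((L.take j).count (L.getD j "") : Int) + 1) hx

-- the outer loop over the groups, pointwise
set_option maxHeartbeats 1000000 in
theorem outer_fold (L : List String) (hx : Bool) :
    ∀ (ns : List String) (res : List String), ns.Nodup → (∀ nm ∈ ns, nm ∈ L) →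
      res.length = L.length →
      (∀ (j : Nat) (h : j < L.length), res[j]? = some (if L[j] ∈ ns then L[j] else specVal L hx j)) →
      ∀ (j : Nat), j < L.length →
        ((ns.map (fun nm => (nm, idxsAux nm L 0))).foldl (fun res q =>
          if 1 < q.2.length then
            (PySem.List.enumerate q.2 1).foldl
              (fun res r => res.set r.2.toNat (with_suffix q.1 r.1 hx)) res
          else res) res)[j]? = some (specVal L hx j) := by
  intro ns
  induction ns with
  | nil =>
    intro res _ _ hlen hinv j hj
    simpa using hinv j hj
  | cons nm t ih =>
    intro res hnd hsub hlen hinv j hj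
    obtain ⟨hnmt, hndt⟩ := List.nodup_cons.mp hnd
    simp only [List.map_cons, List.foldl_cons]
    have hnmL : nm ∈ L := hsub nm List.mem_cons_self
    have hsub' : ∀ x ∈ t, x ∈ L := fun x hxm => hsub x (List.mem_cons_of_mem _ hxm)
    have hcnt : (idxsAux nm L 0).length = L.count nm := idxsAux_length nm L 0
    by_cases hbig : 1 < (idxsAux nm L 0).length
    · rw [if_pos hbig]
      set res2 := (PySem.List.enumerate (idxsAux nm L 0) 1).foldl
        (fun res r => res.set r.2.toNat (with_suffix nm r.1 hx)) res with hres2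
      have hlen2 : res2.length = L.length := by
        rw [hres2, scatter_length, hlen]
      have hinv2 : ∀ (j' : Nat) (h : j' < L.length),
          res2[j']? = some (if L[j'] ∈ t then L[j'] else specVal L hx j') := by
        intro j' hj'
        have hj'r : j' < res.length := by omega
        rw [hres2, scatter_get hx nm (idxsAux nm L 0) (idxsAux_nodup nm L 0)
          (fun x hxm => idxsAux_lb nm L 0 x hxm) 1 res j' hj'r]
        by_cases hLj : L[j'] = nm
        · have hsp := (idxsAux_spec nm L 0 j' hj').1 hLj
          have hmem : ((j' : Nat) : Int) ∈ idxsAux nm L 0 := by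
            have := hsp.1; rwa [zero_add] at this
          have hidx : (idxsAux nm L 0).idxOf ((j' : Nat) : Int) = (L.take j').count nm := by
            have := hsp.2; rwa [zero_add] at this
          rw [if_pos hmem, hidx]
          have hnomem : ¬ (L[j'] ∈ t) := by rw [hLj]; exact hnmt
          rw [if_neg hnomem]
          unfold specVal
          rw [List.getD_eq_getElem _ _ hj', hLj]
          have hc1 : ¬ (L.count nm = 1) := by omega
          rw [if_neg hc1]
          rw [add_comm]
        · have hnomem : ((j' : Nat) : Int) ∉ idxsAux nm L 0 := by
            have := (idxsAux_spec nm L 0 j' hj').2 hLj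
            rwa [zero_add] at this
          rw [if_neg hnomem]
          have h0 := hinv j' hj'
          rw [List.getElem?_eq_getElem hj'r] at h0
          rw [Option.some.inj h0]
          have : (L[j'] ∈ nm :: t) ↔ (L[j'] ∈ t) := by
            simp [List.mem_cons, hLj]
          by_cases hmt : L[j'] ∈ t
          · rw [if_pos (this.mpr hmt), if_pos hmt]
          · rw [if_neg (fun hc => hmt (this.mp hc)), if_neg hmt]
      exact ih res2 hndt hsub' hlen2 hinv2 j hj
    · rw [if_neg hbig]
      have hc1 : L.count nm = 1 := by
        have : 0 < L.count nm := List.count_pos_iff.mpr hnmL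
        omega
      have hinv2 : ∀ (j' : Nat) (h : j' < L.length),
          res[j']? = some (if L[j'] ∈ t then L[j'] else specVal L hx j') := by
        intro j' hj'
        rw [hinv j' hj']
        by_cases hmt : L[j'] ∈ t
        · rw [if_pos (List.mem_cons_of_mem _ hmt), if_pos hmt]
        · rw [if_neg hmt]
          by_cases hLj : L[j'] = nm
          · rw [if_pos (by rw [hLj]; exact List.mem_cons_self)]
            unfold specVal
            rw [List.getD_eq_getElem _ _ hj', hLj, if_pos hc1]
          · rw [if_neg (by simp [List.mem_cons, hLj, hmt])]
      exact ih res hndt hsub' hlen hinv2 j hj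

-- the outer loop preserves the length of the result list
theorem outer_length (hx : Bool) :
    ∀ (its : List (String × List Int)) (res : List String),
      (its.foldl (fun res q =>
        if 1 < q.2.length then
          (PySem.List.enumerate q.2 1).foldl
            (fun res r => res.set r.2.toNat (with_suffix q.1 r.1 hx)) res
        else res) res).length = res.length := by
  intro its
  induction its with
  | nil => intro res; rfl
  | cons q t ih =>
    intro res
    simp only [List.foldl_cons]
    by_cases h : 1 < q.2.length
    · rw [if_pos h, ih, scatter_length]
    · rw [if_neg h, ih]

-- specMap, pointwise
theorem specMap_get (L : List String) (hx : Bool) (j : Nat) (hj : j < L.length) :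
    (specMap L hx)[j]? = some (specVal L hx j) := by
  unfold specMap specVal
  rw [List.getElem?_map, PySem.List.getElem?_enumerate, List.getElem?_eq_getElem hj]
  simp only [Option.map_some]
  congr 1
  have hslice : PySem.List.slice L none (some ((0 : Int) + (j : Int))) = L.take j := by
    rw [zero_add, PySem.List.slice_to L (by positivity), Int.toNat_natCast]
  rw [hslice, PySem.Dict.getD_counter, List.getD_eq_getElem _ _ hj]
  by_cases hc : L.count L[j] = 1
  · have : ((L.count L[j] : Int) == 1) = true := by
      apply beq_iff_eq.mpr; exact_mod_cast hc
    rw [this, if_pos hc]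
    simp
  · have : ((L.count L[j] : Int) == 1) = false := by
      apply beq_eq_false_iff_ne.mpr
      intro he
      exact hc (by exact_mod_cast he)
    rw [this, if_neg hc]
    simp

theorem specMap_length (L : List String) (hx : Bool) : (specMap L hx).length = L.length := by
  simp [specMap, PySem.List.length_enumerate]

-- B equals the pointwise spec
theorem B_eq_specMap (names : List String) (hx : Bool) :
    make_unique_names_alt names hx = specMap (names.map title_to_filename) hx := by
  simp only [make_unique_names_alt]
  set L := names.map title_to_filename with hL
  set G := (PySem.List.enumerate L 0).foldl
      (fun d p => d.modify p.2 [] (fun xs => xs ++ [p.1]))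
      (PySem.Dict.empty : PySem.Dict String (List Int)) with hG
  have hG' : G = ((PySem.List.enumerate L 0).map Prod.swap).foldl
      (fun d q => d.modify q.1 [] (fun xs => xs ++ [q.2])) PySem.Dict.empty := by
    rw [List.foldl_map]
    rfl
  have hkeys : G.keys = PySem.Set.ofList L := by
    rw [hG', PySem.Dict.keys_foldl_modify_key]
    rw [PySem.Dict.keys_empty, PySem.Set.update_nil_left, List.map_map]
    have : (Prod.fst ∘ Prod.swap : Int × String → String) = Prod.snd := rfl
    rw [this, PySem.List.map_snd_enumerate]
  have hnod : G.keys.Nodup := by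
    rw [hkeys]; exact PySem.Set.nodup_ofList L
  have hgetD : ∀ nm, G.getD nm [] = idxsAux nm L 0 := by
    intro nm
    rw [hG', PySem.Dict.getD_foldl_modify_append, PySem.Dict.getD_empty]
    rw [List.filter_map, List.map_map]
    rfl
  have hitems : G.items = (PySem.Set.ofList L).map (fun nm => (nm, idxsAux nm L 0)) := by
    rw [PySem.Dict.items_eq_map_keys G hnod ([] : List Int), hkeys]
    apply List.map_congr_left
    intro nm _
    rw [hgetD]
  rw [hitems]
  apply List.ext_getElem?
  intro j
  by_cases hj : j < L.length
  · rw [specMap_get L hx j hj]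
    exact outer_fold L hx (PySem.Set.ofList L) L (PySem.Set.nodup_ofList L)
      (fun nm h => by rw [PySem.Set.mem_ofList] at h; exact h) rfl
      (fun j' hj' => by
        rw [List.getElem?_eq_getElem hj',
            if_pos (by rw [PySem.Set.mem_ofList]; exact List.getElem_mem hj')])
      j hj
  · rw [List.getElem?_eq_none, List.getElem?_eq_none]
    · rw [specMap_length]; omega
    · rw [outer_length]; omega

-- ===== VERDICT (by name: the statement is the Claim_ definition above) =====
theorem make_unique_names_spec : Claim_equal_make_unique_names := by
  intro names hx _
  unfold Spec_make_unique_names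
  rw [A_eq_specMap, B_eq_specMap]
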